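-- pv_equiv track=rewrite | github.com/ICENacl/sglang | python/sglang/srt/eplb/eplb_async_host_mirror.py | _group_cross_node_transfer_plan
-- ===== SOURCE A (Python) =====
-- def _group_cross_node_transfer_plan(
--     transfer_plan: list[tuple[int, int, int]],
-- ) -> list[tuple[int, int, tuple[int, ...]]]:
--     grouped: dict[tuple[int, int], list[int]] = {}
--     for logical_expert_id, src_node_rank, dst_node_rank in transfer_plan:
--         grouped.setdefault((src_node_rank, dst_node_rank), []).append(logical_expert_id)
--     return [
--         (src_node_rank, dst_node_rank, tuple(logical_expert_ids))
--         for (src_node_rank, dst_node_rank), logical_expert_ids in sorted(grouped.items())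
--     ]
-- ===== SOURCE B (Python) =====
-- def _group_cross_node_transfer_plan(
--     transfer_plan: list[tuple[int, int, int]],
-- ) -> list[tuple[int, int, tuple[int, ...]]]:
--     ordered = sorted(transfer_plan, key=lambda t: (t[1], t[2]))
--     out: list[tuple[int, int, list[int]]] = []
--     for logical_expert_id, src_node_rank, dst_node_rank in ordered:
--         if out and out[-1][0] == src_node_rank and out[-1][1] == dst_node_rank:
--             out[-1][2].append(logical_expert_id)
--         else:
--             out.append((src_node_rank, dst_node_rank, [logical_expert_id]))
--     return [(s, d, tuple(ids)) for s, d, ids in out]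
-- ===== Notes on version B (the rewrite author's own statement) =====
-- stated objective: alternative
-- what changed: Replaces the dict-of-lists grouping plus a sort of the dict items with a stable sort of the whole plan by (src,dst) followed by one linear pass that merges contiguous runs into groups.
import Mathlib
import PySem

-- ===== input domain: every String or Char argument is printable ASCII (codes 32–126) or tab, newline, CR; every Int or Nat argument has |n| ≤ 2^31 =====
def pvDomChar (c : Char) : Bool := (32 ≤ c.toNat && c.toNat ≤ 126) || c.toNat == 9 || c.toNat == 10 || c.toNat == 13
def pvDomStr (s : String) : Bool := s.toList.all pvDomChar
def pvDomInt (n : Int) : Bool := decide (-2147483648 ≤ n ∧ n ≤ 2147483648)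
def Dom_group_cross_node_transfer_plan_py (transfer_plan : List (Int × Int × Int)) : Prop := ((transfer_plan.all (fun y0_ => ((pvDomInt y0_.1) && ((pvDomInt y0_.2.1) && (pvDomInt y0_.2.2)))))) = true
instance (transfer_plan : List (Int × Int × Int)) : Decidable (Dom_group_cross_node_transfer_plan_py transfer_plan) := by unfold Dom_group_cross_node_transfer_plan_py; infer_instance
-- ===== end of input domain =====

-- B replaces A's dict-of-lists grouping plus a sort of the dict items with a stable
-- sort of the whole plan by (src,dst) and one linear pass merging contiguous runs.


-- Python's lexicographic '<' on an (int, int) tuple (Lean's Prod '<' is pointwise, so by hand)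
def pvPairLt (a b : Int × Int) : Bool := a.1 < b.1 || (a.1 == b.1 && a.2 < b.2)

-- ===== PORT A =====
-- Hand-ported stable insertion sort of the dict items by key, exact here: Python's
-- sorted compares the pairs ((s, d), ids) lexicographically, and since dict keys are
-- distinct the comparison never reaches the id lists and ties cannot occur, so the
-- strictly key-increasing result of this insertion sort is exactly Python's.
def pvInsItem (x : (Int × Int) × List Int) : List ((Int × Int) × List Int) → List ((Int × Int) × List Int)
  | [] => [x]
  | y :: ys => if pvPairLt x.1 y.1 then x :: y :: ys else y :: pvInsItem x ys

def pvSortItems (l : List ((Int × Int) × List Int)) : List ((Int × Int) × List Int) :=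
  l.foldl (fun acc x => pvInsItem x acc) []

def group_cross_node_transfer_plan_py (transfer_plan : List (Int × Int × Int)) : List (Int × Int × List Int) :=
  let grouped := transfer_plan.foldl
    (fun d t => d.modify (t.2.1, t.2.2) [] (fun l => l ++ [t.1]))
    (PySem.Dict.empty : PySem.Dict (Int × Int) (List Int))
  (pvSortItems grouped.items).map (fun kv => (kv.1.1, kv.1.2, kv.2))

-- ===== PORT B =====
-- the loop body: append the id to the last group when (src,dst) matches, else open a new group
def pvStep (acc : List (Int × Int × List Int)) (t : Int × Int × Int) : List (Int × Int × List Int) :=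
  match acc.getLast? with
  | some g =>
    if g.1 == t.2.1 && g.2.1 == t.2.2 then
      acc.dropLast ++ [(g.1, g.2.1, g.2.2 ++ [t.1])]
    else acc ++ [(t.2.1, t.2.2, [t.1])]
  | none => acc ++ [(t.2.1, t.2.2, [t.1])]

def group_cross_node_transfer_plan_py_alt (transfer_plan : List (Int × Int × Int)) : List (Int × Int × List Int) :=
  let ordered := PySem.List.sorted2 transfer_plan (fun t => t.2.1) (fun t => t.2.2)
  let out := ordered.foldl pvStep []
  -- final comprehension: tuple(ids) conversion is the identity on the Lean side
  out.map (fun g => (g.1, g.2.1, g.2.2))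

-- ===== PRECONDITION & SPEC =====
def Spec_group_cross_node_transfer_plan_py (transfer_plan : List (Int × Int × Int)) (out : List (Int × Int × List Int)) : Prop := out = group_cross_node_transfer_plan_py_alt transfer_plan
instance (transfer_plan : List (Int × Int × Int)) (out : List (Int × Int × List Int)) : Decidable (Spec_group_cross_node_transfer_plan_py transfer_plan out) := by unfold Spec_group_cross_node_transfer_plan_py; infer_instance

-- ===== CLAIM (what is proved, stated in full; the proofs are below) =====
def Claim_equal_group_cross_node_transfer_plan_py : Prop := ∀ (transfer_plan : List (Int × Int × Int)), Dom_group_cross_node_transfer_plan_py transfer_plan → Spec_group_cross_node_transfer_plan_py transfer_plan (group_cross_node_transfer_plan_py transfer_plan)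

-- ===== LEMMAS AND PROOFS =====

def pvKey (t : Int × Int × Int) : Int × Int := (t.2.1, t.2.2)

def pvGrp (k : Int × Int) (plan : List (Int × Int × Int)) : List Int :=
  (plan.filter (fun t => pvKey t == k)).map (fun t => t.1)

def pvChunk (plan : List (Int × Int × Int)) (k : Int × Int) : List (Int × Int × Int) :=
  plan.filter (fun t => pvKey t == k)

-- insertion sort on bare keys, used only to NAME the sorted key order in the proofs
def pvInsKey (x : Int × Int) : List (Int × Int) → List (Int × Int)
  | [] => [x]
  | y :: ys => if pvPairLt x y then x :: y :: ys else y :: pvInsKey x ys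

def pvSortKeys (l : List (Int × Int)) : List (Int × Int) :=
  l.foldl (fun acc x => pvInsKey x acc) []

def pvNewKeys (seen : List (Int × Int)) : List (Int × Int × Int) → List (Int × Int)
  | [] => []
  | t :: r => if seen.contains (pvKey t) then pvNewKeys seen r
              else pvKey t :: pvNewKeys (seen ++ [pvKey t]) r

-- ---- order facts about pvPairLt ----
theorem pvPairLt_irrefl (a : Int × Int) : pvPairLt a a = false := by
  simp only [pvPairLt, Bool.or_eq_false_iff, Bool.and_eq_false_iff, decide_eq_false_iff_not,
    beq_eq_false_iff_ne]
  omega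

theorem pvPairLt_trans {a b c : Int × Int} (h1 : pvPairLt a b = true) (h2 : pvPairLt b c = true) :
    pvPairLt a c = true := by
  simp only [pvPairLt, Bool.or_eq_true, Bool.and_eq_true, decide_eq_true_eq, beq_iff_eq] at *
  omega

theorem pvPairLt_asymm {a b : Int × Int} (h : pvPairLt a b = true) : pvPairLt b a = false := by
  simp only [pvPairLt, Bool.or_eq_true, Bool.and_eq_true, decide_eq_true_eq, beq_iff_eq,
    Bool.or_eq_false_iff, Bool.and_eq_false_iff, decide_eq_false_iff_not, beq_eq_false_iff_ne] at *
  omega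

theorem pvPairLt_total {a b : Int × Int} (h : a ≠ b) : pvPairLt a b = true ∨ pvPairLt b a = true := by
  simp only [pvPairLt, Bool.or_eq_true, Bool.and_eq_true, decide_eq_true_eq, beq_iff_eq]
  rcases a with ⟨a1, a2⟩; rcases b with ⟨b1, b2⟩
  simp only [ne_eq, Prod.mk.injEq, not_and] at h
  by_cases h1 : a1 = b1
  · subst h1; have := h rfl; omega
  · omega

-- ---- A side: characterise the dict fold + item sort ----
theorem pvNewKeys_not_mem {seen : List (Int × Int)} {plan : List (Int × Int × Int)}
    {k : Int × Int} (h : k ∈ pvNewKeys seen plan) : k ∉ seen := by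
  induction plan generalizing seen with
  | nil => simp [pvNewKeys] at h
  | cons t r ih =>
    unfold pvNewKeys at h
    split at h
    · exact ih h
    · rcases List.mem_cons.1 h with h | h
      · subst h
        rename_i hc
        simpa using hc
      · intro hk
        exact ih h (by simp [hk])

theorem pvOfList_newKeys (plan : List (Int × Int × Int)) (s : List (Int × Int)) :
    (plan.map pvKey).foldl PySem.Set.add s = s ++ pvNewKeys s plan := by
  induction plan generalizing s with
  | nil => simp [pvNewKeys]
  | cons t r ih =>
    simp only [List.map_cons, List.foldl_cons]
    unfold pvNewKeys
    by_cases hc : s.contains (pvKey t)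
    · have hm : pvKey t ∈ s := by simpa using hc
      rw [hc]
      have : PySem.Set.add s (pvKey t) = s := by
        simp [PySem.Set.add, PySem.Set.contains, hm]
      rw [this, ih]
      simp
    · rw [Bool.not_eq_true] at hc
      have hm : pvKey t ∉ s := by simpa using hc
      rw [hc]
      have : PySem.Set.add s (pvKey t) = s ++ [pvKey t] := by
        simp [PySem.Set.add, PySem.Set.contains, hm]
      rw [this, ih]
      simp

theorem pvFind?_of_nodup {items : List ((Int × Int) × List Int)}
    (hnd : (items.map Prod.fst).Nodup) {kv : (Int × Int) × List Int} (h : kv ∈ items) :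
    items.find? (fun p => p.1 == kv.1) = some kv := by
  induction items with
  | nil => simp at h
  | cons x xs ih =>
    simp only [List.map_cons, List.nodup_cons] at hnd
    rcases List.mem_cons.1 h with h | h
    · subst h
      simp [List.find?]
    · have hne : ¬ (x.1 == kv.1) = true := by
        simp only [beq_iff_eq]
        intro he
        exact hnd.1 (he ▸ List.mem_map_of_mem h)
      simp only [List.find?, hne]
      exact ih hnd.2 h

theorem pvFoldA_items (plan : List (Int × Int × Int)) (d : PySem.Dict (Int × Int) (List Int))
    (hnd : (d.items.map Prod.fst).Nodup) :
    (plan.foldl (fun d t => d.modify (t.2.1, t.2.2) [] (fun l => l ++ [t.1])) d).items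
      = d.items.map (fun kv => (kv.1, kv.2 ++ pvGrp kv.1 plan))
        ++ (pvNewKeys d.keys plan).map (fun k => (k, pvGrp k plan)) := by
  induction plan generalizing d with
  | nil => simp [pvNewKeys, pvGrp]
  | cons t r ih =>
    simp only [List.foldl_cons]
    have hkey : (t.2.1, t.2.2) = pvKey t := rfl
    by_cases hc : d.contains (pvKey t) = true
    · -- key already present
      obtain ⟨kv0, hkv0mem, hkv0key⟩ : ∃ kv0 ∈ d.items, kv0.1 = pvKey t := by
        simp only [PySem.Dict.contains, List.any_eq_true, beq_iff_eq] at hc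
        exact hc
      have hfind : d.items.find? (fun p => p.1 == pvKey t) = some kv0 := by
        have := pvFind?_of_nodup hnd hkv0mem
        rwa [hkv0key] at this
      have hitems' : (d.modify (t.2.1, t.2.2) [] (fun l => l ++ [t.1])).items
          = d.items.map (fun p => if p.1 == pvKey t then (pvKey t, kv0.2 ++ [t.1]) else p) := by
        simp [PySem.Dict.modify, PySem.Dict.insert, PySem.Dict.getD, PySem.Dict.get?,
          hkey, hc, hfind]
      have hkeys' : (d.modify (t.2.1, t.2.2) [] (fun l => l ++ [t.1])).items.map Prod.fst
          = d.items.map Prod.fst := by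
        rw [hitems', List.map_map]
        refine List.map_congr_left (fun p _ => ?_)
        by_cases hp : p.1 = pvKey t <;> simp [hp]
      have hkeysd : (d.modify (t.2.1, t.2.2) [] (fun l => l ++ [t.1])).keys = d.keys := by
        simp only [PySem.Dict.keys]
        exact hkeys'
      rw [ih _ (by rw [hkeys']; exact hnd)]
      have hmemkeys : d.keys.contains (pvKey t) = true := by
        simp only [PySem.Dict.keys, List.contains_eq_mem, List.mem_map, decide_eq_true_eq]
        exact ⟨kv0, hkv0mem, hkv0key⟩
      have hnk : pvNewKeys d.keys (t :: r) = pvNewKeys d.keys r := by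
        rw [show pvNewKeys d.keys (t :: r)
            = if d.keys.contains (pvKey t) then pvNewKeys d.keys r
              else pvKey t :: pvNewKeys (d.keys ++ [pvKey t]) r from rfl, hmemkeys]
        simp
      rw [hkeysd, hnk, hitems', List.map_map]
      congr 1
      · refine List.map_congr_left (fun kv hkv => ?_)
        by_cases hp : kv.1 = pvKey t
        · have hkv0 : kv = kv0 := by
            have h1 := pvFind?_of_nodup hnd hkv
            rw [hp] at h1
            rw [h1] at hfind
            exact Option.some.inj hfind
          simp only [Function.comp_apply, hp, beq_self_eq_true, if_pos]
          subst hkv0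
          simp [pvGrp, List.append_assoc]
        · simp only [Function.comp_apply, beq_iff_eq, hp, if_neg, not_false_iff]
          simp only [pvGrp, List.filter_cons]
          have : ¬ (pvKey t == kv.1) = true := by
            simp only [beq_iff_eq]; intro h; exact hp h.symm
          simp [this]
      · refine List.map_congr_left (fun k hk => ?_)
        have hkne : k ≠ pvKey t := by
          intro he
          have := pvNewKeys_not_mem hk
          apply this
          have : pvKey t ∈ d.keys := by simpa using hmemkeys
          rwa [he]
        simp only [pvGrp, List.filter_cons]
        have : ¬ (pvKey t == k) = true := by
          simp only [beq_iff_eq]; intro h; exact hkne h.symm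
        simp [this]
    · -- new key
      rw [Bool.not_eq_true] at hc
      have hany : (d.items.any fun p => p.1 == pvKey t) = false := hc
      have hfind : d.items.find? (fun p => p.1 == pvKey t) = none := by
        simp only [List.any_eq_false] at hany
        exact List.find?_eq_none.2 hany
      have hnotmem : pvKey t ∉ d.items.map Prod.fst := by
        simp only [List.any_eq_false, beq_iff_eq] at hany
        simp only [List.mem_map]
        rintro ⟨p, hp, hpk⟩
        exact hany p hp hpk
      have hitems' : (d.modify (t.2.1, t.2.2) [] (fun l => l ++ [t.1])).items
          = d.items ++ [(pvKey t, [t.1])] := by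
        simp [PySem.Dict.modify, PySem.Dict.insert, PySem.Dict.getD, PySem.Dict.get?,
          PySem.Dict.contains, hkey, hany, hfind]
      have hnd' : ((d.modify (t.2.1, t.2.2) [] (fun l => l ++ [t.1])).items.map Prod.fst).Nodup := by
        rw [hitems']
        simp only [List.map_append, List.map_cons, List.map_nil]
        simp only [List.nodup_append, hnd, List.nodup_cons, List.not_mem_nil,
          not_false_iff, List.nodup_nil, true_and]
        intro a ha b hb
        simp only [List.mem_cons, List.not_mem_nil, or_false] at hb
        subst hb
        intro he
        exact hnotmem (he ▸ ha)
      have hkeys' : (d.modify (t.2.1, t.2.2) [] (fun l => l ++ [t.1])).keys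
          = d.keys ++ [pvKey t] := by
        simp [PySem.Dict.keys, hitems']
      rw [ih _ hnd']
      rw [hitems', hkeys']
      have hnk : pvNewKeys d.keys (t :: r)
          = pvKey t :: pvNewKeys (d.keys ++ [pvKey t]) r := by
        rw [show pvNewKeys d.keys (t :: r)
            = if d.keys.contains (pvKey t) then pvNewKeys d.keys r
              else pvKey t :: pvNewKeys (d.keys ++ [pvKey t]) r from rfl]
        have : d.keys.contains (pvKey t) = false := by
          simp only [PySem.Dict.keys, List.contains_eq_mem, decide_eq_false_iff_not]
          exact hnotmem
        rw [this]
        simp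
      rw [hnk]
      simp only [List.map_append, List.map_cons, List.map_nil, List.append_assoc,
        List.singleton_append]
      congr 1
      · refine List.map_congr_left (fun kv hkv => ?_)
        have hkne : kv.1 ≠ pvKey t := by
          intro he
          exact hnotmem (he ▸ List.mem_map_of_mem hkv)
        simp only [pvGrp, List.filter_cons]
        have : ¬ (pvKey t == kv.1) = true := by
          simp only [beq_iff_eq]; intro h; exact hkne h.symm
        simp [this]
      · congr 1
        · simp [pvGrp]
        · refine List.map_congr_left (fun k hk => ?_)
          have hkne : k ≠ pvKey t := by
            intro he
            exact pvNewKeys_not_mem hk (by simp [he])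
          simp only [pvGrp, List.filter_cons]
          have : ¬ (pvKey t == k) = true := by
            simp only [beq_iff_eq]; intro h; exact hkne h.symm
          simp [this]

theorem pvInsItem_map (k : Int × Int) (f : Int × Int → List Int) (acc : List (Int × Int)) :
    pvInsItem (k, f k) (acc.map (fun k => (k, f k))) = (pvInsKey k acc).map (fun k => (k, f k)) := by
  induction acc with
  | nil => simp [pvInsItem, pvInsKey]
  | cons y ys ih =>
    simp only [List.map_cons, pvInsItem, pvInsKey]
    split <;> simp [ih]

theorem pvSort_comm (l : List (Int × Int)) (f : Int × Int → List Int) :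
    pvSortItems (l.map (fun k => (k, f k))) = (pvSortKeys l).map (fun k => (k, f k)) := by
  have main : ∀ (l acc : List (Int × Int)),
      (l.map (fun k => (k, f k))).foldl (fun a x => pvInsItem x a) (acc.map (fun k => (k, f k)))
        = (l.foldl (fun a x => pvInsKey x a) acc).map (fun k => (k, f k)) := by
    intro l
    induction l with
    | nil => intro acc; simp
    | cons y ys ih =>
      intro acc
      simp only [List.map_cons, List.foldl_cons]
      rw [pvInsItem_map, ih]
  simpa using main l []

-- ---- pvSortKeys: permutation, nodup, sortedness ----
theorem pvInsKey_perm (x : Int × Int) (l : List (Int × Int)) : (pvInsKey x l).Perm (x :: l) := by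
  induction l with
  | nil => simp [pvInsKey]
  | cons y ys ih =>
    simp only [pvInsKey]
    split
    · exact List.Perm.refl _
    · exact (List.Perm.cons y ih).trans (List.Perm.swap x y ys)

theorem pvSortKeys_perm (l : List (Int × Int)) : (pvSortKeys l).Perm l := by
  have main : ∀ (l acc : List (Int × Int)),
      (l.foldl (fun a x => pvInsKey x a) acc).Perm (l ++ acc) := by
    intro l
    induction l with
    | nil => intro acc; simp
    | cons y ys ih =>
      intro acc
      simp only [List.foldl_cons]
      refine (ih (pvInsKey y acc)).trans ?_
      have h1 : (ys ++ pvInsKey y acc).Perm (ys ++ y :: acc) :=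
        List.Perm.append_left ys (pvInsKey_perm y acc)
      have h2 : (ys ++ y :: acc).Perm (y :: (ys ++ acc)) := List.perm_middle
      simpa using h1.trans h2
  simpa using main l []

theorem pvFlatMapCongr {α : Type} {l : List (Int × Int)} {f g : Int × Int → List α}
    (h : ∀ k ∈ l, f k = g k) : l.flatMap f = l.flatMap g := by
  induction l with
  | nil => rfl
  | cons k ks ih =>
    simp only [List.flatMap_cons]
    rw [h k (by simp), ih (fun k' hk' => h k' (by simp [hk']))]

theorem pvInsKey_pairwise {x : Int × Int} {l : List (Int × Int)}
    (hl : l.Pairwise (fun a b => pvPairLt a b = true)) (hx : x ∉ l) :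
    (pvInsKey x l).Pairwise (fun a b => pvPairLt a b = true) := by
  induction l with
  | nil => simp [pvInsKey]
  | cons y ys ih =>
    rcases List.pairwise_cons.1 hl with ⟨hy, hys⟩
    simp only [List.mem_cons, not_or] at hx
    simp only [pvInsKey]
    split
    · rename_i hlt
      refine List.pairwise_cons.2 ⟨?_, hl⟩
      intro z hz
      rcases List.mem_cons.1 hz with hz | hz
      · subst hz; exact hlt
      · exact pvPairLt_trans hlt (hy z hz)
    · rename_i hnlt
      refine List.pairwise_cons.2 ⟨?_, ih hys hx.2⟩
      intro z hz
      have hz' : z = x ∨ z ∈ ys := by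
        have := (pvInsKey_perm x ys).mem_iff.1 hz
        simpa using this
      rcases hz' with hz | hz
      · subst hz
        rcases pvPairLt_total (Ne.symm hx.1) with h | h
        · exact h
        · exact absurd h (by simpa using hnlt)
      · exact hy z hz

theorem pvSortKeys_pairwise {l : List (Int × Int)} (hnd : l.Nodup) :
    (pvSortKeys l).Pairwise (fun a b => pvPairLt a b = true) := by
  have main : ∀ (l acc : List (Int × Int)), (l ++ acc).Nodup →
      acc.Pairwise (fun a b => pvPairLt a b = true) →
      (l.foldl (fun a x => pvInsKey x a) acc).Pairwise (fun a b => pvPairLt a b = true) := by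
    intro l
    induction l with
    | nil => intro acc _ h; simpa using h
    | cons y ys ih =>
      intro acc hnd hacc
      simp only [List.foldl_cons]
      have hy_notin : y ∉ acc := by
        have := hnd
        simp only [List.cons_append, List.nodup_cons, List.mem_append] at this
        exact fun h => this.1 (Or.inr h)
      refine ih (pvInsKey y acc) ?_ (pvInsKey_pairwise hacc hy_notin)
      have hperm : (ys ++ pvInsKey y acc).Perm (y :: (ys ++ acc)) :=
        (List.Perm.append_left ys (pvInsKey_perm y acc)).trans List.perm_middle
      exact hperm.symm.nodup (by simpa using hnd)
  simpa using main l [] (by simpa using hnd) List.Pairwise.nil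

-- ---- B side: the sorted2 fold is the flatMap of sorted chunks ----
theorem pvBf_eq (a b : Int × Int × Int) :
    (decide (a.2.1 < b.2.1) || (!decide (b.2.1 < a.2.1) && decide (a.2.2 < b.2.2)))
      = pvPairLt (pvKey a) (pvKey b) := by
  simp only [pvPairLt, pvKey]
  by_cases h1 : a.2.1 < b.2.1
  · simp [h1]
  · by_cases h2 : b.2.1 < a.2.1
    · have : ¬ (a.2.1 = b.2.1) := by omega
      simp [h1, h2, this]
    · have : a.2.1 = b.2.1 := by omega
      simp [h1, h2, this]

theorem pvInsertBy_append_false {bf : (Int × Int × Int) → (Int × Int × Int) → Bool}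
    {t : Int × Int × Int} {l1 l2 : List (Int × Int × Int)}
    (h : ∀ u ∈ l1, bf t u = false) :
    PySem.List.insertBy bf t (l1 ++ l2) = l1 ++ PySem.List.insertBy bf t l2 := by
  induction l1 with
  | nil => simp
  | cons y ys ih =>
    simp only [List.cons_append, PySem.List.insertBy]
    rw [h y (by simp)]
    simp only [Bool.false_eq_true, if_neg, not_false_iff]
    rw [ih (fun u hu => h u (by simp [hu]))]

theorem pvInsertBy_all_true {bf : (Int × Int × Int) → (Int × Int × Int) → Bool}
    {t : Int × Int × Int} {l : List (Int × Int × Int)}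
    (h : ∀ u ∈ l, bf t u = true) :
    PySem.List.insertBy bf t l = t :: l := by
  cases l with
  | nil => rfl
  | cons y ys =>
    simp only [PySem.List.insertBy]
    rw [h y (by simp)]
    simp

-- the comparator used throughout the B-side proof
def pvBf (a b : Int × Int × Int) : Bool := pvPairLt (pvKey a) (pvKey b)

theorem pvL1 {keys : List (Int × Int)} {g : Int × Int → List (Int × Int × Int)}
    {t : Int × Int × Int}
    (hpure : ∀ k ∈ keys, ∀ u ∈ g k, pvKey u = k)
    (hsorted : keys.Pairwise (fun a b => pvPairLt a b = true))
    (hnd : keys.Nodup)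
    (hmem : pvKey t ∈ keys) :
    PySem.List.insertBy pvBf t (keys.flatMap g)
      = keys.flatMap (fun k => if k = pvKey t then g k ++ [t] else g k) := by
  induction keys with
  | nil => simp at hmem
  | cons k ks ih =>
    rcases List.pairwise_cons.1 hsorted with ⟨hk, hks⟩
    rcases List.nodup_cons.1 hnd with ⟨hknotin, hksnd⟩
    simp only [List.flatMap_cons]
    by_cases hkx : k = pvKey t
    · have hfalse : ∀ u ∈ g k, pvBf t u = false := by
        intro u hu
        rw [show pvBf t u = pvPairLt (pvKey t) (pvKey u) from rfl,
          hpure k (by simp) u hu, ← hkx, pvPairLt_irrefl]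
      rw [pvInsertBy_append_false hfalse]
      have htrue : ∀ u ∈ ks.flatMap g, pvBf t u = true := by
        intro u hu
        rcases List.mem_flatMap.1 hu with ⟨k', hk', hu'⟩
        rw [show pvBf t u = pvPairLt (pvKey t) (pvKey u) from rfl,
          hpure k' (by simp [hk']) u hu', ← hkx]
        exact hk k' hk'
      rw [pvInsertBy_all_true htrue]
      rw [if_pos hkx]
      have hrest : ks.flatMap (fun k' => if k' = pvKey t then g k' ++ [t] else g k')
          = ks.flatMap g := by
        refine pvFlatMapCongr (fun k' hk' => ?_)
        have : k' ≠ pvKey t := fun h => hknotin (by rw [hkx]; exact h ▸ hk')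
        rw [if_neg this]
      rw [hrest]
      simp
    · have hxks : pvKey t ∈ ks := by
        rcases List.mem_cons.1 hmem with h | h
        · exact absurd h.symm hkx
        · exact h
      have hltkx : pvPairLt k (pvKey t) = true := hk _ hxks
      have hfalse : ∀ u ∈ g k, pvBf t u = false := by
        intro u hu
        rw [show pvBf t u = pvPairLt (pvKey t) (pvKey u) from rfl,
          hpure k (by simp) u hu]
        exact pvPairLt_asymm hltkx
      rw [pvInsertBy_append_false hfalse,
        ih (fun k' hk' => hpure k' (by simp [hk'])) hks hksnd hxks]
      rw [if_neg hkx]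

theorem pvL2 {keys : List (Int × Int)} {g : Int × Int → List (Int × Int × Int)}
    {t : Int × Int × Int}
    (hpure : ∀ k ∈ keys, ∀ u ∈ g k, pvKey u = k)
    (hsorted : keys.Pairwise (fun a b => pvPairLt a b = true))
    (hnotmem : pvKey t ∉ keys) :
    PySem.List.insertBy pvBf t (keys.flatMap g)
      = (pvInsKey (pvKey t) keys).flatMap (fun k => if k = pvKey t then [t] else g k) := by
  induction keys with
  | nil =>
    simp [pvInsKey, PySem.List.insertBy]
  | cons k ks ih =>
    rcases List.pairwise_cons.1 hsorted with ⟨hk, hks⟩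
    simp only [List.mem_cons, not_or] at hnotmem
    simp only [List.flatMap_cons, pvInsKey]
    by_cases hlt : pvPairLt (pvKey t) k = true
    · rw [if_pos hlt]
      have htrue : ∀ u ∈ g k ++ ks.flatMap g, pvBf t u = true := by
        intro u hu
        rcases List.mem_append.1 hu with hu | hu
        · rw [show pvBf t u = pvPairLt (pvKey t) (pvKey u) from rfl, hpure k (by simp) u hu]
          exact hlt
        · rcases List.mem_flatMap.1 hu with ⟨k', hk', hu'⟩
          rw [show pvBf t u = pvPairLt (pvKey t) (pvKey u) from rfl,
            hpure k' (by simp [hk']) u hu']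
          exact pvPairLt_trans hlt (hk k' hk')
      rw [pvInsertBy_all_true htrue]
      have hkne : k ≠ pvKey t := by
        intro h
        rw [h, pvPairLt_irrefl] at hlt
        exact absurd hlt (by simp)
      simp only [List.flatMap_cons, if_neg hkne]
      have hrest : ks.flatMap (fun k' => if k' = pvKey t then [t] else g k')
          = ks.flatMap g := by
        refine pvFlatMapCongr (fun k' hk' => ?_)
        have : k' ≠ pvKey t := fun h => hnotmem.2 (h ▸ hk')
        rw [if_neg this]
      rw [hrest]
      simp
    · rw [if_neg hlt]
      have hfalse : ∀ u ∈ g k, pvBf t u = false := by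
        intro u hu
        rw [show pvBf t u = pvPairLt (pvKey t) (pvKey u) from rfl, hpure k (by simp) u hu]
        exact Bool.not_eq_true _ ▸ (by simpa using hlt)
      rw [pvInsertBy_append_false hfalse,
        ih (fun k' hk' => hpure k' (by simp [hk'])) hks hnotmem.2]
      simp only [List.flatMap_cons]
      rw [if_neg (fun h => hnotmem.1 h.symm)]

-- ---- B side: the grouping fold consumes sorted chunks ----
theorem pvFoldRun {k : Int × Int} {us : List (Int × Int × Int)}
    (hpure : ∀ u ∈ us, pvKey u = k) (acc0 : List (Int × Int × List Int)) (ids : List Int) :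
    us.foldl pvStep (acc0 ++ [(k.1, k.2, ids)])
      = acc0 ++ [(k.1, k.2, ids ++ us.map (fun u => u.1))] := by
  induction us generalizing ids with
  | nil => simp
  | cons u us ih =>
    simp only [List.foldl_cons]
    have hku : pvKey u = k := hpure u (by simp)
    have h1 : u.2.1 = k.1 := by rw [← hku]; rfl
    have h2 : u.2.2 = k.2 := by rw [← hku]; rfl
    have hstep : pvStep (acc0 ++ [(k.1, k.2, ids)]) u
        = acc0 ++ [(k.1, k.2, ids ++ [u.1])] := by
      simp [pvStep, h1, h2]
    rw [hstep, ih (fun v hv => hpure v (by simp [hv]))]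
    simp

theorem pvFoldChunks {keys : List (Int × Int)} {g : Int × Int → List (Int × Int × Int)}
    (hpure : ∀ k ∈ keys, ∀ u ∈ g k, pvKey u = k)
    (hne : ∀ k ∈ keys, g k ≠ [])
    (hnd : keys.Nodup)
    (acc : List (Int × Int × List Int))
    (hacc : ∀ x, acc.getLast? = some x → (x.1, x.2.1) ∉ keys) :
    (keys.flatMap g).foldl pvStep acc
      = acc ++ keys.map (fun k => (k.1, k.2, (g k).map (fun u => u.1))) := by
  induction keys generalizing acc with
  | nil => simp
  | cons k ks ih =>
    rcases List.nodup_cons.1 hnd with ⟨hknotin, hksnd⟩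
    simp only [List.flatMap_cons, List.foldl_append]
    obtain ⟨u, us, hgu⟩ : ∃ u us, g k = u :: us := by
      cases hg : g k with
      | nil => exact absurd hg (hne k (by simp))
      | cons u us => exact ⟨u, us, rfl⟩
    have hku : pvKey u = k := hpure k (by simp) u (by simp [hgu])
    have h1 : u.2.1 = k.1 := by rw [← hku]; rfl
    have h2 : u.2.2 = k.2 := by rw [← hku]; rfl
    have hstep1 : pvStep acc u = acc ++ [(k.1, k.2, [u.1])] := by
      cases hlast : acc.getLast? with
      | none => simp [pvStep, hlast, h1, h2]
      | some x =>
        have hxk : (x.1, x.2.1) ≠ k := fun h => hacc x hlast (by simp [h])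
        have hcond : (x.1 == u.2.1 && x.2.1 == u.2.2) = false := by
          rw [h1, h2]
          by_cases e1 : x.1 = k.1
          · have e2 : x.2.1 ≠ k.2 := by
              intro e2; exact hxk (by rw [e1, e2])
            simp [e1, e2]
          · simp [e1]
        simp only [pvStep, hlast]
        rw [hcond]
        simp [h1, h2]
    have hrun : (g k).foldl pvStep acc = acc ++ [(k.1, k.2, (g k).map (fun u => u.1))] := by
      rw [hgu]
      simp only [List.foldl_cons]
      rw [hstep1, pvFoldRun (fun v hv => hpure k (by simp) v (by simp [hgu, hv])) acc [u.1]]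
      simp
    rw [hrun, ih (fun k' hk' => hpure k' (by simp [hk'])) (fun k' hk' => hne k' (by simp [hk']))
      hksnd _ ?_]
    · simp
    · intro x hx
      rw [List.getLast?_concat] at hx
      have hx' : x = (k.1, k.2, (g k).map (fun u => u.1)) := by
        have := Option.some.inj hx
        exact this.symm
      subst hx'
      simpa using hknotin

-- the keys of a plan, in first-occurrence order
theorem pvChunk_pure (plan : List (Int × Int × Int)) (k : Int × Int) :
    ∀ u ∈ pvChunk plan k, pvKey u = k := by
  intro u hu
  have := List.of_mem_filter hu
  simpa using this

theorem pvNewKeys_eq_ofList (p : List (Int × Int × Int)) :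
    pvNewKeys [] p = PySem.Set.ofList (p.map pvKey) := by
  have := pvOfList_newKeys p []
  simp only [List.nil_append] at this
  rw [PySem.Set.ofList_eq_foldl, this]

theorem pvNewKeys_nodup (p : List (Int × Int × Int)) : (pvNewKeys [] p).Nodup := by
  rw [pvNewKeys_eq_ofList]
  exact PySem.Set.nodup_ofList _

theorem pvMem_newKeys {p : List (Int × Int × Int)} {k : Int × Int} :
    k ∈ pvNewKeys [] p ↔ k ∈ p.map pvKey := by
  rw [pvNewKeys_eq_ofList]
  exact PySem.Set.mem_ofList _ _

theorem pvChunk_append (p : List (Int × Int × Int)) (t : Int × Int × Int) (k : Int × Int) :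
    pvChunk (p ++ [t]) k = pvChunk p k ++ (if pvKey t = k then [t] else []) := by
  simp only [pvChunk, List.filter_append, List.filter_cons, List.filter_nil]
  by_cases h : pvKey t = k <;> simp [h]

theorem pvChunk_nil_of_not_mem {p : List (Int × Int × Int)} {k : Int × Int}
    (h : k ∉ p.map pvKey) : pvChunk p k = [] := by
  simp only [pvChunk, List.filter_eq_nil_iff]
  intro u hu
  simp only [beq_iff_eq]
  intro he
  exact h (he ▸ List.mem_map_of_mem hu)

theorem pvSorted2_foldl (plan : List (Int × Int × Int)) :
    plan.foldl (fun acc x => PySem.List.insertBy pvBf x acc) []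
      = (pvSortKeys (pvNewKeys [] plan)).flatMap (pvChunk plan) := by
  induction plan using List.reverseRecOn with
  | nil => simp [pvNewKeys, pvSortKeys]
  | append_singleton p t ih =>
    rw [List.foldl_append, List.foldl_cons, List.foldl_nil, ih]
    have hndK : (pvNewKeys [] p).Nodup := pvNewKeys_nodup p
    have hkeysnd : (pvSortKeys (pvNewKeys [] p)).Nodup :=
      (pvSortKeys_perm _).symm.nodup hndK
    have hsorted := pvSortKeys_pairwise hndK
    have hpure : ∀ k ∈ pvSortKeys (pvNewKeys [] p), ∀ u ∈ pvChunk p k, pvKey u = k :=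
      fun k _ => pvChunk_pure p k
    have hmemiff : ∀ k, k ∈ pvSortKeys (pvNewKeys [] p) ↔ k ∈ p.map pvKey := by
      intro k
      rw [(pvSortKeys_perm _).mem_iff, pvMem_newKeys]
    have hKapp : pvNewKeys [] (p ++ [t])
        = PySem.Set.add (pvNewKeys [] p) (pvKey t) := by
      rw [pvNewKeys_eq_ofList, pvNewKeys_eq_ofList, PySem.Set.ofList_eq_foldl,
        PySem.Set.ofList_eq_foldl, List.map_append, List.foldl_append]
      rfl
    by_cases hmem : pvKey t ∈ pvSortKeys (pvNewKeys [] p)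
    · -- the key already occurs in p: the key list is unchanged
      rw [pvL1 hpure hsorted hkeysnd hmem]
      have hKsame : pvNewKeys [] (p ++ [t]) = pvNewKeys [] p := by
        rw [hKapp]
        have : pvKey t ∈ pvNewKeys [] p := (pvSortKeys_perm _).mem_iff.1 hmem
        simp [PySem.Set.add, PySem.Set.contains, this]
      rw [hKsame]
      refine (pvFlatMapCongr (fun k hk => ?_)).symm
      rw [pvChunk_append]
      by_cases hkx : k = pvKey t
      · rw [if_pos (hkx.symm), if_pos hkx]
      · rw [if_neg (fun h => hkx h.symm), if_neg hkx, List.append_nil]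
    · -- new key: it is inserted into the sorted key list
      rw [pvL2 hpure hsorted hmem]
      have hnotK : pvKey t ∉ pvNewKeys [] p := fun h =>
        hmem ((pvSortKeys_perm _).mem_iff.2 h)
      have hKnew : pvNewKeys [] (p ++ [t]) = pvNewKeys [] p ++ [pvKey t] := by
        rw [hKapp]
        simp only [PySem.Set.add, PySem.Set.contains]
        rw [if_neg (by simpa using hnotK)]
      rw [hKnew]
      have hSnew : pvSortKeys (pvNewKeys [] p ++ [pvKey t])
          = pvInsKey (pvKey t) (pvSortKeys (pvNewKeys [] p)) := by
        simp only [pvSortKeys, List.foldl_append, List.foldl_cons, List.foldl_nil]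
      rw [hSnew]
      refine (pvFlatMapCongr (fun k hk => ?_)).symm
      have hk' : k = pvKey t ∨ k ∈ pvSortKeys (pvNewKeys [] p) := by
        have := (pvInsKey_perm (pvKey t) (pvSortKeys (pvNewKeys [] p))).mem_iff.1 hk
        simpa using this
      rw [pvChunk_append]
      by_cases hkx : k = pvKey t
      · rw [if_pos (hkx.symm), if_pos hkx]
        have : pvChunk p k = [] := by
          refine pvChunk_nil_of_not_mem (fun h => ?_)
          exact hnotK (pvMem_newKeys.2 (hkx ▸ h))
        rw [this]
        simp
      · rw [if_neg (fun h => hkx h.symm), if_neg hkx, List.append_nil]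

theorem pvSorted2_eq (plan : List (Int × Int × Int)) :
    PySem.List.sorted2 plan (fun t => t.2.1) (fun t => t.2.2)
      = plan.foldl (fun acc x => PySem.List.insertBy pvBf x acc) [] := by
  show plan.foldl (fun acc x => PySem.List.insertBy
      (fun a b => decide (a.2.1 < b.2.1) || (!decide (b.2.1 < a.2.1) && decide (a.2.2 < b.2.2)))
      x acc) [] = _
  have hbf : (fun (a b : Int × Int × Int) =>
      decide (a.2.1 < b.2.1) || (!decide (b.2.1 < a.2.1) && decide (a.2.2 < b.2.2))) = pvBf := by
    funext a b
    exact pvBf_eq a b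
  rw [hbf]

-- ===== VERDICT (by name: the statement is the Claim_ definition above) =====
theorem group_cross_node_transfer_plan_py_spec : Claim_equal_group_cross_node_transfer_plan_py := by
  intro plan _
  unfold Spec_group_cross_node_transfer_plan_py
  unfold group_cross_node_transfer_plan_py group_cross_node_transfer_plan_py_alt
  dsimp only
  -- A side: dict fold + item sort = sorted first-occurrence keys, each with its group
  have hempty : (PySem.Dict.empty : PySem.Dict (Int × Int) (List Int)).items = [] := rfl
  have hkeys : (PySem.Dict.empty : PySem.Dict (Int × Int) (List Int)).keys = [] := rfl
  rw [pvFoldA_items plan PySem.Dict.empty (by rw [hempty]; simp)]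
  rw [hempty, hkeys]
  simp only [List.map_nil, List.nil_append]
  rw [pvSort_comm, List.map_map]
  -- B side: stable sort = flatMap of sorted chunks, then the run-merging fold
  rw [pvSorted2_eq, pvSorted2_foldl]
  have hndK : (pvNewKeys [] plan).Nodup := pvNewKeys_nodup plan
  have hne : ∀ k ∈ pvSortKeys (pvNewKeys [] plan), pvChunk plan k ≠ [] := by
    -- every key in the sorted key list occurs in the plan, so its chunk is nonempty
    intro k hk hnil
    have hkmem : k ∈ plan.map pvKey :=
      pvMem_newKeys.1 ((pvSortKeys_perm _).mem_iff.1 hk)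
    rcases List.mem_map.1 hkmem with ⟨u, hu, hku⟩
    have : u ∈ pvChunk plan k := by
      simp only [pvChunk, List.mem_filter, beq_iff_eq]
      exact ⟨hu, hku⟩
    rw [hnil] at this
    simp at this
  rw [pvFoldChunks (fun k _ => pvChunk_pure plan k)
    hne ((pvSortKeys_perm _).symm.nodup hndK) [] (by simp)]
  rw [List.nil_append, List.map_map]
  refine List.map_congr_left (fun k _ => ?_)
  simp [pvGrp, pvChunk]
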